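-- pv_equiv track=rewrite | github.com/Str0mxx/atlas | app/core/selfcode/code_generator.py | _generate_type_hints
-- ===== SOURCE A (Python) =====
-- TYPE_HINT_MAP: dict[str, str] = {
--     "name": "str",
--     "path": "str",
--     "url": "str",
--     "key": "str",
--     "title": "str",
--     "description": "str",
--     "message": "str",
--     "text": "str",
--     "count": "int",
--     "size": "int",
--     "limit": "int",
--     "max_": "int",
--     "min_": "int",
--     "index": "int",
--     "port": "int",
--     "timeout": "float",
--     "enabled": "bool",
--     "active": "bool",
--     "is_": "bool",
--     "has_": "bool",
--     "allow_": "bool",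
--     "items": "list",
--     "values": "list",
--     "list_": "list",
--     "tags": "list",
--     "config": "dict",
--     "options": "dict",
--     "data": "dict",
--     "metadata": "dict",
--     "params": "dict",
--     "headers": "dict",
-- }
--
-- def _generate_type_hints(param_name: str) -> str:
--     """Parametre adina gore tip ipucu onerir.
--
--     TYPE_HINT_MAP'teki kaliplari kullanarak uygun tipi tahmin eder.
--
--     Args:
--         param_name: Parametre adi.
--
--     Returns:
--         Onerilen tip ipucu dizgesi.
--     """
--     lower_name = param_name.lower()
--
--     # Tam eslesme kontrol et
--     if lower_name in TYPE_HINT_MAP: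
--         return TYPE_HINT_MAP[lower_name]
--
--     # Onek eslesmesi kontrol et
--     for pattern, type_hint in TYPE_HINT_MAP.items():
--         if pattern.endswith("_") and lower_name.startswith(pattern):
--             return type_hint
--
--     # Sonek eslesmesi kontrol et
--     for pattern, type_hint in TYPE_HINT_MAP.items():
--         if not pattern.endswith("_") and lower_name.endswith(pattern):
--             return type_hint
--
--     # Varsayilan tip
--     return "Any"
-- ===== SOURCE B (Python) =====
-- TYPE_HINT_MAP: dict[str, str] = {
--     "name": "str",
--     "path": "str",
--     "url": "str",
--     "key": "str",
--     "title": "str",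
--     "description": "str",
--     "message": "str",
--     "text": "str",
--     "count": "int",
--     "size": "int",
--     "limit": "int",
--     "max_": "int",
--     "min_": "int",
--     "index": "int",
--     "port": "int",
--     "timeout": "float",
--     "enabled": "bool",
--     "active": "bool",
--     "is_": "bool",
--     "has_": "bool",
--     "allow_": "bool",
--     "items": "list",
--     "values": "list",
--     "list_": "list",
--     "tags": "list",
--     "config": "dict",
--     "options": "dict",
--     "data": "dict",
--     "metadata": "dict",
--     "params": "dict",
--     "headers": "dict",
-- }
--
-- # The pattern map split once by kind: patterns ending in "_" match as prefixes,
-- # the rest as suffixes; no candidate longer than the longest pattern can be a key.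
-- PREFIX_MAP = {p: t for p, t in TYPE_HINT_MAP.items() if p.endswith("_")}
-- SUFFIX_MAP = {p: t for p, t in TYPE_HINT_MAP.items() if not p.endswith("_")}
-- _MAX_PAT = max(len(p) for p in TYPE_HINT_MAP)
--
--
-- def _generate_type_hints(param_name: str) -> str:
--     lower_name = param_name.lower()
--
--     if lower_name in TYPE_HINT_MAP:
--         return TYPE_HINT_MAP[lower_name]
--
--     # Look the name's own prefixes (shortest first) and suffixes (longest
--     # first) up as dict keys, up to the longest pattern length.
--     k = min(len(lower_name), _MAX_PAT)
--     hit = None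
--     for i in range(1, k + 1):
--         hit = PREFIX_MAP.get(lower_name[:i])
--         if hit is not None:
--             break
--     if hit is None:
--         for i in range(k, -1, -1):
--             hit = SUFFIX_MAP.get(lower_name[len(lower_name) - i:])
--             if hit is not None:
--                 break
--     return hit if hit is not None else "Any"
-- ===== Notes on version B (the rewrite author's own statement) =====
-- stated objective: alternative
-- what changed: Instead of A's two scans over all 31 patterns testing each against the name, B splits the map once into PREFIX_MAP/SUFFIX_MAP and looks the NAME's own prefixes (shortest first) and suffixes (longest first), capped at the longest pattern length, up as dict keys; correct because no prefix pattern is a prefix of another and the only suffix-pattern pair in suffix relation (data/metadata) shares its value.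
import Mathlib
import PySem

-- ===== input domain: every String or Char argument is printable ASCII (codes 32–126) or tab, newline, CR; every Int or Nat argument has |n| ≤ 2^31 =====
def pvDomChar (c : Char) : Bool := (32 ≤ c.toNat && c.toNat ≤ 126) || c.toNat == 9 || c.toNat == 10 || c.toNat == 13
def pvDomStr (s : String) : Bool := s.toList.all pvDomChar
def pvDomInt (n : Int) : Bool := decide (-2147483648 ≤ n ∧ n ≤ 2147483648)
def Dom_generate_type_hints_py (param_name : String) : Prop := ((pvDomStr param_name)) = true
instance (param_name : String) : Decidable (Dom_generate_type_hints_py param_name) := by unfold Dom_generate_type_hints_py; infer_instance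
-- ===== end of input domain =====

-- ===== PORT A =====
-- B replaces A's scans over the pattern map by dict lookups of the name's own
-- prefixes/suffixes in a pre-split PREFIX_MAP/SUFFIX_MAP (objective: alternative).
def typeHintMap : List (String × String) := [
  ("name", "str"), ("path", "str"), ("url", "str"), ("key", "str"),
  ("title", "str"), ("description", "str"), ("message", "str"), ("text", "str"),
  ("count", "int"), ("size", "int"), ("limit", "int"), ("max_", "int"),
  ("min_", "int"), ("index", "int"), ("port", "int"), ("timeout", "float"),
  ("enabled", "bool"), ("active", "bool"), ("is_", "bool"), ("has_", "bool"),
  ("allow_", "bool"), ("items", "list"), ("values", "list"), ("list_", "list"),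
  ("tags", "list"), ("config", "dict"), ("options", "dict"), ("data", "dict"),
  ("metadata", "dict"), ("params", "dict"), ("headers", "dict")]

def typeHintDict : PySem.Dict String String := PySem.Dict.ofList typeHintMap

-- A's first for-loop: prefix scan over the map with early return
def scanPrefixA : List (String × String) → String → Option String
  | [], _ => none
  | (p, t) :: rest, n =>
    if PySem.Str.endswith p "_" && PySem.Str.startswith n p then some t
    else scanPrefixA rest n

-- A's second for-loop: suffix scan over the map with early return
def scanSuffixA : List (String × String) → String → Option String
  | [], _ => none
  | (p, t) :: rest, n =>
    if !PySem.Str.endswith p "_" && PySem.Str.endswith n p then some t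
    else scanSuffixA rest n

def generate_type_hints_py (param_name : String) : String :=
  let lower_name := PySem.Str.lower param_name
  match PySem.Dict.get? typeHintDict lower_name with
  | some t => t
  | none =>
    match scanPrefixA typeHintMap lower_name with
    | some t => t
    | none =>
      match scanSuffixA typeHintMap lower_name with
      | some t => t
      | none => "Any"

-- ===== PORT B =====
-- PREFIX_MAP / SUFFIX_MAP: the pattern map split once by kind; _MAX_PAT
def prefixDict : PySem.Dict String String :=
  PySem.Dict.ofList (typeHintMap.filter (fun pr => PySem.Str.endswith pr.1 "_"))
def suffixDict : PySem.Dict String String :=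
  PySem.Dict.ofList (typeHintMap.filter (fun pr => !PySem.Str.endswith pr.1 "_"))
def maxPat : Nat := (typeHintMap.map (fun pr => pr.1.length)).foldl Nat.max 0

-- first loop: the name's prefixes, shortest first (lengths 1..k), as keys of PREFIX_MAP
def prefKeysB (nl : List Char) (k : Nat) : Option String :=
  (List.range' 1 k).findSome? (fun i => PySem.Dict.get? prefixDict (String.ofList (nl.take i)))

-- second loop: the name's suffixes, longest first (lengths k..0), as keys of SUFFIX_MAP
def sufKeysB (nl : List Char) (k : Nat) : Option String :=
  ((List.range (k + 1)).reverse).findSome?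
    (fun i => PySem.Dict.get? suffixDict (String.ofList (nl.drop (nl.length - i))))

def generate_type_hints_py_alt (param_name : String) : String :=
  let lower_name := PySem.Str.lower param_name
  match PySem.Dict.get? typeHintDict lower_name with
  | some t => t
  | none =>
    let nl := lower_name.toList
    let k := min nl.length maxPat
    let hit := match prefKeysB nl k with
               | some v => some v
               | none => sufKeysB nl k
    hit.getD "Any"

-- ===== PRECONDITION & SPEC =====
def Spec_generate_type_hints_py (param_name : String) (out : String) : Prop := out = generate_type_hints_py_alt param_name
instance (param_name : String) (out : String) : Decidable (Spec_generate_type_hints_py param_name out) := by unfold Spec_generate_type_hints_py; infer_instance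

-- ===== CLAIM (what is proved, stated in full; the proofs are below) =====
def Claim_equal_generate_type_hints_py : Prop := ∀ (param_name : String), Dom_generate_type_hints_py param_name → Spec_generate_type_hints_py param_name (generate_type_hints_py param_name)

-- ===== LEMMAS AND PROOFS =====

-- the two halves of the map, as lists
def prefixPairs : List (String × String) := typeHintMap.filter (fun pr => PySem.Str.endswith pr.1 "_")
def suffixPairs : List (String × String) := typeHintMap.filter (fun pr => !PySem.Str.endswith pr.1 "_")

theorem items_prefixDict : prefixDict.items = prefixPairs := by decide
theorem items_suffixDict : suffixDict.items = suffixPairs := by decide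
theorem nodup_keys_prefixDict : prefixDict.keys.Nodup := by decide
theorem nodup_keys_suffixDict : suffixDict.keys.Nodup := by decide

-- combinatorial facts about the fixed pattern set
theorem fact_pref : ∀ p ∈ prefixPairs, ∀ q ∈ prefixPairs, p.1.toList <+: q.1.toList → p.2 = q.2 := by decide
theorem fact_suf : ∀ p ∈ suffixPairs, ∀ q ∈ suffixPairs, p.1.toList <:+ q.1.toList → p.2 = q.2 := by decide
theorem fact_pref_len : ∀ p ∈ prefixPairs, 1 ≤ p.1.toList.length ∧ p.1.toList.length ≤ maxPat := by decide
theorem fact_suf_len : ∀ p ∈ suffixPairs, p.1.toList.length ≤ maxPat := by decide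

-- A-side scan characterisations
theorem scanPrefixA_some (L : List (String × String)) (n : String) (v : String)
    (h : scanPrefixA L n = some v) :
    ∃ p, (p, v) ∈ L ∧ PySem.Str.endswith p "_" = true ∧ PySem.Str.startswith n p = true := by
  induction L with
  | nil => simp [scanPrefixA] at h
  | cons a rest ih =>
    obtain ⟨p, t⟩ := a
    simp only [scanPrefixA] at h
    split_ifs at h with hc
    · obtain ⟨h1, h2⟩ := Bool.and_eq_true_iff.1 hc
      cases h
      exact ⟨p, List.mem_cons_self, h1, h2⟩
    · obtain ⟨p', hm, h1, h2⟩ := ih h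
      exact ⟨p', List.mem_cons_of_mem _ hm, h1, h2⟩

theorem scanPrefixA_none (L : List (String × String)) (n : String)
    (h : scanPrefixA L n = none) :
    ∀ p v, (p, v) ∈ L → PySem.Str.endswith p "_" = true → PySem.Str.startswith n p = false := by
  induction L with
  | nil => simp
  | cons a rest ih =>
    obtain ⟨q, t⟩ := a
    simp only [scanPrefixA] at h
    split_ifs at h with hc
    intro p v hm h1
    rcases List.mem_cons.1 hm with he | hm'
    · obtain ⟨hpq, hvt⟩ := Prod.mk.inj he
      subst hpq
      cases hs : PySem.Str.startswith n p
      · rfl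
      · exact absurd (Bool.and_eq_true_iff.2 ⟨h1, hs⟩) hc
    · exact ih h p v hm' h1

theorem scanSuffixA_some (L : List (String × String)) (n : String) (v : String)
    (h : scanSuffixA L n = some v) :
    ∃ p, (p, v) ∈ L ∧ PySem.Str.endswith p "_" = false ∧ PySem.Str.endswith n p = true := by
  induction L with
  | nil => simp [scanSuffixA] at h
  | cons a rest ih =>
    obtain ⟨p, t⟩ := a
    simp only [scanSuffixA] at h
    split_ifs at h with hc
    · obtain ⟨h1, h2⟩ := Bool.and_eq_true_iff.1 hc
      cases h
      exact ⟨p, List.mem_cons_self, by simpa using h1, h2⟩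
    · obtain ⟨p', hm, h1, h2⟩ := ih h
      exact ⟨p', List.mem_cons_of_mem _ hm, h1, h2⟩

theorem scanSuffixA_none (L : List (String × String)) (n : String)
    (h : scanSuffixA L n = none) :
    ∀ p v, (p, v) ∈ L → PySem.Str.endswith p "_" = false → PySem.Str.endswith n p = false := by
  induction L with
  | nil => simp
  | cons a rest ih =>
    obtain ⟨q, t⟩ := a
    simp only [scanSuffixA] at h
    split_ifs at h with hc
    intro p v hm h1
    rcases List.mem_cons.1 hm with he | hm'
    · obtain ⟨hpq, hvt⟩ := Prod.mk.inj he
      subst hpq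
      cases hs : PySem.Str.endswith n p
      · rfl
      · exact absurd (Bool.and_eq_true_iff.2 ⟨by simpa using h1, hs⟩) hc
    · exact ih h p v hm' h1

-- bridges between get? on the split dicts and membership in the split lists
theorem get?_prefixDict_iff (k v : String) :
    PySem.Dict.get? prefixDict k = some v ↔ (k, v) ∈ prefixPairs := by
  rw [PySem.Dict.get?_eq_some_iff_mem_items prefixDict k v nodup_keys_prefixDict, items_prefixDict]

theorem get?_suffixDict_iff (k v : String) :
    PySem.Dict.get? suffixDict k = some v ↔ (k, v) ∈ suffixPairs := by
  rw [PySem.Dict.get?_eq_some_iff_mem_items suffixDict k v nodup_keys_suffixDict, items_suffixDict]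

-- the two prefix strategies agree
theorem prefix_agree (n : String) :
    scanPrefixA typeHintMap n = prefKeysB n.toList (min n.toList.length maxPat) := by
  cases hA : scanPrefixA typeHintMap n with
  | some v =>
    cases hB : prefKeysB n.toList (min n.toList.length maxPat) with
    | some w =>
      obtain ⟨p, hm, hp1, hp2⟩ := scanPrefixA_some _ _ _ hA
      obtain ⟨i, hi, hget⟩ := List.exists_of_findSome?_eq_some hB
      have hmemA : (p, v) ∈ prefixPairs := List.mem_filter.2 ⟨hm, by simpa using hp1⟩
      have hmemB : (String.ofList (n.toList.take i), w) ∈ prefixPairs :=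
        (get?_prefixDict_iff _ _).1 hget
      have hpA : p.toList <+: n.toList :=
        (PySem.Chars.startswith_iff n.toList p.toList).1 (by simpa using hp2)
      have hpB : (String.ofList (n.toList.take i)).toList <+: n.toList := by
        simpa using List.take_prefix i n.toList
      rcases List.prefix_or_prefix_of_prefix hpA hpB with hpq | hqp
      · exact congrArg some (fact_pref (p, v) hmemA (String.ofList (n.toList.take i), w) hmemB hpq)
      · exact congrArg some ((fact_pref (String.ofList (n.toList.take i), w) hmemB (p, v) hmemA hqp).symm)
    | none =>
      obtain ⟨p, hm, hp1, hp2⟩ := scanPrefixA_some _ _ _ hA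
      have hmemA : (p, v) ∈ prefixPairs := List.mem_filter.2 ⟨hm, by simpa using hp1⟩
      have hpA : p.toList <+: n.toList :=
        (PySem.Chars.startswith_iff n.toList p.toList).1 (by simpa using hp2)
      have hlen : 1 ≤ p.toList.length ∧ p.toList.length ≤ maxPat := fact_pref_len (p, v) hmemA
      have hmem : p.toList.length ∈ List.range' 1 (min n.toList.length maxPat) := by
        rw [List.mem_range'_1]
        have := hpA.length_le
        omega
      have hnone := (List.findSome?_eq_none_iff.1 hB) p.toList.length hmem
      rw [← List.prefix_iff_eq_take.1 hpA] at hnone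
      rw [show String.ofList p.toList = p by simp] at hnone
      exact absurd ((get?_prefixDict_iff p v).2 hmemA) (by simp [hnone])
  | none =>
    cases hB : prefKeysB n.toList (min n.toList.length maxPat) with
    | some w =>
      obtain ⟨i, hi, hget⟩ := List.exists_of_findSome?_eq_some hB
      have hmemB : (String.ofList (n.toList.take i), w) ∈ prefixPairs :=
        (get?_prefixDict_iff _ _).1 hget
      have hfilt := List.mem_filter.1 hmemB
      have hstart : PySem.Str.startswith n (String.ofList (n.toList.take i)) = true := by
        simp only [PySem.Str.startswith_eq]
        exact (PySem.Chars.startswith_iff _ _).2 (by simpa using List.take_prefix i n.toList)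
      have := scanPrefixA_none _ _ hA (String.ofList (n.toList.take i)) w hfilt.1 (by simpa using hfilt.2)
      rw [this] at hstart
      exact absurd hstart (by simp)
    | none => rfl

-- the two suffix strategies agree
theorem suffix_agree (n : String) :
    scanSuffixA typeHintMap n = sufKeysB n.toList (min n.toList.length maxPat) := by
  cases hA : scanSuffixA typeHintMap n with
  | some v =>
    cases hB : sufKeysB n.toList (min n.toList.length maxPat) with
    | some w =>
      obtain ⟨p, hm, hp1, hp2⟩ := scanSuffixA_some _ _ _ hA
      obtain ⟨i, hi, hget⟩ := List.exists_of_findSome?_eq_some hB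
      have hp1' : PySem.Chars.endswith p.toList ['_'] = false := by simpa using hp1
      have hmemA : (p, v) ∈ suffixPairs := List.mem_filter.2 ⟨hm, by simp [hp1']⟩
      have hmemB : (String.ofList (n.toList.drop (n.toList.length - i)), w) ∈ suffixPairs :=
        (get?_suffixDict_iff _ _).1 hget
      have hsA : p.toList <:+ n.toList :=
        (PySem.Chars.endswith_iff n.toList p.toList).1 (by simpa using hp2)
      have hsB : (String.ofList (n.toList.drop (n.toList.length - i))).toList <:+ n.toList := by
        simpa using List.drop_suffix (n.toList.length - i) n.toList
      rcases List.suffix_or_suffix_of_suffix hsA hsB with hpq | hqp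
      · exact congrArg some (fact_suf (p, v) hmemA (String.ofList (n.toList.drop (n.toList.length - i)), w) hmemB hpq)
      · exact congrArg some ((fact_suf (String.ofList (n.toList.drop (n.toList.length - i)), w) hmemB (p, v) hmemA hqp).symm)
    | none =>
      obtain ⟨p, hm, hp1, hp2⟩ := scanSuffixA_some _ _ _ hA
      have hp1' : PySem.Chars.endswith p.toList ['_'] = false := by simpa using hp1
      have hmemA : (p, v) ∈ suffixPairs := List.mem_filter.2 ⟨hm, by simp [hp1']⟩
      have hsA : p.toList <:+ n.toList :=
        (PySem.Chars.endswith_iff n.toList p.toList).1 (by simpa using hp2)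
      have hlen : p.toList.length ≤ maxPat := fact_suf_len (p, v) hmemA
      have hmem : p.toList.length ∈ (List.range (min n.toList.length maxPat + 1)).reverse := by
        rw [List.mem_reverse, List.mem_range]
        have := hsA.length_le
        omega
      have hnone := (List.findSome?_eq_none_iff.1 hB) p.toList.length hmem
      rw [← List.suffix_iff_eq_drop.1 hsA] at hnone
      rw [show String.ofList p.toList = p by simp] at hnone
      exact absurd ((get?_suffixDict_iff p v).2 hmemA) (by simp [hnone])
  | none =>
    cases hB : sufKeysB n.toList (min n.toList.length maxPat) with
    | some w =>
      obtain ⟨i, hi, hget⟩ := List.exists_of_findSome?_eq_some hB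
      have hmemB : (String.ofList (n.toList.drop (n.toList.length - i)), w) ∈ suffixPairs :=
        (get?_suffixDict_iff _ _).1 hget
      have hfilt := List.mem_filter.1 hmemB
      have hend : PySem.Str.endswith n (String.ofList (n.toList.drop (n.toList.length - i))) = true := by
        simp only [PySem.Str.endswith_eq]
        exact (PySem.Chars.endswith_iff _ _).2 (by simpa using List.drop_suffix (n.toList.length - i) n.toList)
      have := scanSuffixA_none _ _ hA (String.ofList (n.toList.drop (n.toList.length - i))) w hfilt.1 (by simpa using hfilt.2)
      rw [this] at hend
      exact absurd hend (by simp)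
    | none => rfl

-- ===== VERDICT (by name: the statement is the Claim_ definition above) =====
theorem generate_type_hints_py_spec : Claim_equal_generate_type_hints_py := by
  intro param_name _
  unfold Spec_generate_type_hints_py generate_type_hints_py generate_type_hints_py_alt
  cases hd : PySem.Dict.get? typeHintDict (PySem.Str.lower param_name) with
  | some t => simp [hd]
  | none =>
    simp only [hd, ← prefix_agree, ← suffix_agree]
    cases hp : scanPrefixA typeHintMap (PySem.Str.lower param_name) with
    | some t => simp
    | none =>
      cases hs : scanSuffixA typeHintMap (PySem.Str.lower param_name) with
      | some t => simp
      | none => simp
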